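-- pv_equiv track=rewrite | github.com/otaviolemos/python_sanbox | src/remove_islands/remove_islands.py | find_ones_at_borders
-- ===== SOURCE A (Python) =====
-- def find_ones_at_borders(grid):
--   ones_at_borders = list()
--   nrows = len(grid)
--   ncolumns = len(grid[0])
--   row = 0
--   for column in range (0, ncolumns):
--     if grid[row][column] == 1:
--       ones_at_borders.append([row, column])
--   row = nrows - 1
--   for column in range (0, ncolumns):
--     if grid[row][column] == 1:
--       ones_at_borders.append([row, column])
--   column = 0
--   for row in range (0, nrows):
--     if grid[row][column] == 1:
--       ones_at_borders.append([row, column])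
--   column = ncolumns - 1
--   for row in range (0, nrows):
--     if grid[row][column] == 1:
--       ones_at_borders.append([row, column])
--   return set(tuple(i) for i in ones_at_borders)
-- ===== SOURCE B (Python) =====
-- def _decode(k, nrows, ncolumns, inner):
--   # map a perimeter index k (in A's scan order) to its border cell (r, c)
--   if k < ncolumns:
--     return (0, k)
--   if k < 2 * ncolumns:
--     return (nrows - 1, k - ncolumns)
--   if k < 2 * ncolumns + inner:
--     return (k - 2 * ncolumns + 1, 0)
--   return (k - 2 * ncolumns - inner + 1, ncolumns - 1)
--
--
-- def find_ones_at_borders(grid):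
--   nrows = len(grid)
--   ncolumns = len(grid[0])
--   inner = max(nrows - 2, 0)
--   result = set()
--   for k in range(2 * ncolumns + 2 * inner):
--     (r, c) = _decode(k, nrows, ncolumns, inner)
--     if grid[r][c] == 1:
--       result.add((r, c))
--   return result
-- ===== Notes on version B (the rewrite author's own statement) =====
-- stated objective: alternative
-- what changed: B replaces A's four separate border scans plus intermediate list and trailing set() conversion by a single loop over one arithmetic perimeter index k (length 2*ncolumns + 2*max(nrows-2,0)) that decodes k into a border coordinate (side columns restricted to interior rows) and inserts hits directly into the set.
import Mathlib
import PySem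

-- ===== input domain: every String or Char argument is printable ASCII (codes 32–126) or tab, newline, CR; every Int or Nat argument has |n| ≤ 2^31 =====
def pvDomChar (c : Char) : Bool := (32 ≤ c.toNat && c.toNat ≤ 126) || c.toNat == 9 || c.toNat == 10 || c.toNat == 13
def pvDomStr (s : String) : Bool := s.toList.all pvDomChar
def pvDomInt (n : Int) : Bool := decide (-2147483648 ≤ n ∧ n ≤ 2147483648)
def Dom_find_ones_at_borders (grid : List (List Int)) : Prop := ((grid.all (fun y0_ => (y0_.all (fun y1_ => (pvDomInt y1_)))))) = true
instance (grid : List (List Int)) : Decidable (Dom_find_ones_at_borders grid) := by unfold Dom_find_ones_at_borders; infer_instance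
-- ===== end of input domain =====

-- B replaces A's four separate border scans + intermediate list + trailing set() by a single
-- loop over one arithmetic perimeter index that decodes each index into a border coordinate
-- (side columns restricted to interior rows) and inserts hits directly into the set;
-- objective: alternative decomposition, same cost.

-- ===== PORT A =====
def find_ones_at_borders (grid : List (List Int)) : List (Int × Int) :=
  let nrows : Int := grid.length
  let ncolumns : Int := (PySem.List.pyGetD grid 0 ([] : List Int)).length
  -- row = 0 scan
  let ones1 : List (Int × Int) := (PySem.List.pyRange 0 ncolumns 1).foldl (fun acc column =>
    if PySem.List.pyGetD (PySem.List.pyGetD grid 0 ([] : List Int)) column 0 == 1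
    then acc ++ [((0 : Int), column)] else acc) []
  -- row = nrows - 1 scan
  let ones2 : List (Int × Int) := (PySem.List.pyRange 0 ncolumns 1).foldl (fun acc column =>
    if PySem.List.pyGetD (PySem.List.pyGetD grid (nrows - 1) ([] : List Int)) column 0 == 1
    then acc ++ [(nrows - 1, column)] else acc) ones1
  -- column = 0 scan
  let ones3 : List (Int × Int) := (PySem.List.pyRange 0 nrows 1).foldl (fun acc row =>
    if PySem.List.pyGetD (PySem.List.pyGetD grid row ([] : List Int)) 0 0 == 1
    then acc ++ [(row, (0 : Int))] else acc) ones2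
  -- column = ncolumns - 1 scan
  let ones4 : List (Int × Int) := (PySem.List.pyRange 0 nrows 1).foldl (fun acc row =>
    if PySem.List.pyGetD (PySem.List.pyGetD grid row ([] : List Int)) (ncolumns - 1) 0 == 1
    then acc ++ [(row, ncolumns - 1)] else acc) ones3
  PySem.Set.ofList ones4

-- ===== PORT B =====
-- helper _decode of Source B: perimeter index k ↦ border cell (r, c)
def pvDecode (k nrows ncolumns inner : Int) : Int × Int :=
  if k < ncolumns then (0, k)
  else if k < 2 * ncolumns then (nrows - 1, k - ncolumns)
  else if k < 2 * ncolumns + inner then (k - 2 * ncolumns + 1, 0)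
  else (k - 2 * ncolumns - inner + 1, ncolumns - 1)

def find_ones_at_borders_alt (grid : List (List Int)) : List (Int × Int) :=
  let nrows : Int := grid.length
  let ncolumns : Int := (PySem.List.pyGetD grid 0 ([] : List Int)).length
  let inner : Int := max (nrows - 2) 0
  (PySem.List.pyRange 0 (2 * ncolumns + 2 * inner) 1).foldl (fun result k =>
    if PySem.List.pyGetD (PySem.List.pyGetD grid (pvDecode k nrows ncolumns inner).1 ([] : List Int)) (pvDecode k nrows ncolumns inner).2 0 == 1
    then PySem.Set.add result (pvDecode k nrows ncolumns inner) else result) []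

-- ===== PRECONDITION & SPEC =====
-- Pre_ is exactly where the Python A returns: a non-empty grid whose first row is non-empty and
-- whose every row has at least as many entries as the first (otherwise grid[0] / grid[row][column]
-- raises IndexError).
def Pre_find_ones_at_borders (grid : List (List Int)) : Prop :=
  grid ≠ [] ∧ 0 < grid.headI.length ∧ ∀ row ∈ grid, grid.headI.length ≤ row.length
instance (grid : List (List Int)) : Decidable (Pre_find_ones_at_borders grid) := by
  unfold Pre_find_ones_at_borders; infer_instance

def pvWitness_find_ones_at_borders : List (List Int) := [[1, 0], [0, 1]]

def Spec_find_ones_at_borders (grid : List (List Int)) (out : List (Int × Int)) : Prop := out = find_ones_at_borders_alt grid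
instance (grid : List (List Int)) (out : List (Int × Int)) : Decidable (Spec_find_ones_at_borders grid out) := by unfold Spec_find_ones_at_borders; infer_instance

-- ===== CLAIM (what is proved, stated in full; the proofs are below) =====
def Claim_equal_find_ones_at_borders : Prop := ∀ (grid : List (List Int)), Dom_find_ones_at_borders grid → Pre_find_ones_at_borders grid → Spec_find_ones_at_borders grid (find_ones_at_borders grid)

-- ===== LEMMAS AND PROOFS =====

lemma pvOfList_append {α : Type} [BEq α] (X Y : List α) :
    PySem.Set.ofList (X ++ Y) = (PySem.Set.ofList X).update Y := by
  simp [PySem.Set.ofList_eq_foldl, PySem.Set.update, List.foldl_append]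

lemma pvUpdate_opt {α : Type} [BEq α] [LawfulBEq α] (s : PySem.Set α) (c : Bool) (x : α)
    (h : c = true → x ∈ s) : s.update (if c then [x] else []) = s := by
  cases c with
  | false => rfl
  | true =>
      show PySem.Set.add s x = s
      exact PySem.Set.add_of_mem (h rfl)

lemma pvUpdate_append {α : Type} [BEq α] (s : PySem.Set α) (X Y : List α) :
    s.update (X ++ Y) = (s.update X).update Y := by
  simp [PySem.Set.update, List.foldl_append]

lemma pvUpdate_nil {α : Type} [BEq α] (s : PySem.Set α) : s.update ([] : List α) = s := rfl

lemma pvMem_map_filter_pyRange {α : Type} (p : Int → Bool) (f : Int → α) {a b x : Int}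
    (h0 : a ≤ x) (h1 : x < b) (hp : p x = true) :
    f x ∈ ((PySem.List.pyRange a b 1).filter p).map f :=
  List.mem_map_of_mem (List.mem_filter.2 ⟨PySem.List.mem_pyRange_one.2 ⟨h0, h1⟩, hp⟩)

-- B's conditional-insert loop is an update by the filtered, decoded index list
lemma pvFoldl_ite_add {α β : Type} [BEq α] (p : β → Bool) (f : β → α)
    (l : List β) : ∀ (s : PySem.Set α),
    l.foldl (fun s k => if p k then PySem.Set.add s (f k) else s) s
      = PySem.Set.update s ((l.filter p).map f) := by
  induction l with
  | nil => intro s; rfl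
  | cons k l ih =>
      intro s
      by_cases h : p k <;> simp [h, PySem.Set.update, List.foldl_cons, ih]

-- shifting a unit range
lemma pvRange_shift (a b d : Int) :
    PySem.List.pyRange a b 1
      = (PySem.List.pyRange (a - d) (b - d) 1).map (fun k => k + d) := by
  rw [PySem.List.pyRange_one, PySem.List.pyRange_one, List.map_map]
  have hlen : (b - d - (a - d)) = b - a := by ring
  rw [hlen]
  congr 1
  funext k
  simp [Function.comp]
  ring

-- replace the decoder by its closed form on a segment of indices
lemma pvSeg {α : Type} (a b : Int) (g : α → Bool) (dec : Int → α)
    (p1 : Int → Bool) (f1 : Int → α)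
    (h : ∀ k, a ≤ k → k < b → dec k = f1 k ∧ g (dec k) = p1 k) :
    ((PySem.List.pyRange a b 1).filter (fun k => g (dec k))).map dec
  = ((PySem.List.pyRange a b 1).filter p1).map f1 := by
  rw [List.filter_congr (fun x hx => by
    have hb := PySem.List.mem_pyRange_one.1 hx
    exact (h x hb.1 hb.2).2)]
  exact List.map_congr_left (fun x hx => by
    have hb := PySem.List.mem_pyRange_one.1 (List.mem_filter.1 hx).1
    exact (h x hb.1 hb.2).1)

-- un-shift a filtered-and-mapped segment
lemma pvShiftFM {α : Type} (a b d : Int) (q : Int → Bool) (h : Int → α) :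
    ((PySem.List.pyRange a b 1).filter (fun k => q (k - d))).map (fun k => h (k - d))
  = ((PySem.List.pyRange (a - d) (b - d) 1).filter q).map h := by
  rw [pvRange_shift a b d, List.filter_map, List.map_map]
  have hp : ∀ x ∈ PySem.List.pyRange (a - d) (b - d) 1,
      ((fun k => q (k - d)) ∘ fun k => k + d) x = q x := by
    intro x _; show q (x + d - d) = q x; rw [add_sub_cancel_right]
  rw [List.filter_congr hp]
  exact List.map_congr_left (fun x _ => by
    show h (x + d - d) = h x; rw [add_sub_cancel_right])

-- interior range written through inner = max (n-2) 0
lemma pvInnerRange (n : Int) :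
    PySem.List.pyRange 1 (max (n - 2) 0 + 1) 1 = PySem.List.pyRange 1 (n - 1) 1 := by
  by_cases h : 2 ≤ n
  · have e : max (n - 2) 0 = n - 2 := by omega
    rw [e]; congr 1; ring
  · rw [PySem.List.pyRange_one_eq_nil (by omega),
        PySem.List.pyRange_one_eq_nil (by omega)]

-- characterisation of B's port: the single decoded loop builds exactly the set of the four
-- interior-restricted border lists in order
lemma pvAltChar (grid : List (List Int)) :
    find_ones_at_borders_alt grid
  = PySem.Set.ofList
      (((PySem.List.pyRange 0 ((PySem.List.pyGetD grid 0 ([] : List Int)).length : Int) 1).filter (fun c =>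
          PySem.List.pyGetD (PySem.List.pyGetD grid 0 ([] : List Int)) c 0 == 1)).map (fun c => ((0 : Int), c)) ++
       ((PySem.List.pyRange 0 ((PySem.List.pyGetD grid 0 ([] : List Int)).length : Int) 1).filter (fun c =>
          PySem.List.pyGetD (PySem.List.pyGetD grid ((grid.length : Int) - 1) ([] : List Int)) c 0 == 1)).map (fun c => ((grid.length : Int) - 1, c)) ++
       ((PySem.List.pyRange 1 ((grid.length : Int) - 1) 1).filter (fun r =>
          PySem.List.pyGetD (PySem.List.pyGetD grid r ([] : List Int)) 0 0 == 1)).map (fun r => (r, (0 : Int))) ++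
       ((PySem.List.pyRange 1 ((grid.length : Int) - 1) 1).filter (fun r =>
          PySem.List.pyGetD (PySem.List.pyGetD grid r ([] : List Int)) (((PySem.List.pyGetD grid 0 ([] : List Int)).length : Int) - 1) 0 == 1)).map
         (fun r => (r, ((PySem.List.pyGetD grid 0 ([] : List Int)).length : Int) - 1))) := by
  unfold find_ones_at_borders_alt
  set n : Int := (grid.length : Int) with hn
  set m : Int := ((PySem.List.pyGetD grid 0 ([] : List Int)).length : Int) with hm
  set inner : Int := max (n - 2) 0 with hinner
  have hm0 : 0 ≤ m := by rw [hm]; exact_mod_cast Nat.zero_le _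
  have hin0 : 0 ≤ inner := le_max_right _ _
  rw [pvFoldl_ite_add
        (fun k => PySem.List.pyGetD (PySem.List.pyGetD grid (pvDecode k n m inner).1 ([] : List Int)) (pvDecode k n m inner).2 0 == 1)
        (fun k => pvDecode k n m inner), PySem.Set.update_nil_left]
  congr 1
  rw [PySem.List.pyRange_one_append 0 m (2 * m + 2 * inner) (by omega) (by omega),
      PySem.List.pyRange_one_append m (2 * m) (2 * m + 2 * inner) (by omega) (by omega),
      PySem.List.pyRange_one_append (2 * m) (2 * m + inner) (2 * m + 2 * inner) (by omega) (by omega)]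
  simp only [List.filter_append, List.map_append, List.append_assoc]
  congr 1
  · -- segment 1: top row
    exact pvSeg 0 m
      (fun rc : Int × Int => PySem.List.pyGetD (PySem.List.pyGetD grid rc.1 ([] : List Int)) rc.2 0 == 1)
      (fun k => pvDecode k n m inner)
      (fun c => PySem.List.pyGetD (PySem.List.pyGetD grid 0 ([] : List Int)) c 0 == 1)
      (fun c => ((0 : Int), c))
      (fun k h0 h1 => by
        have hd : pvDecode k n m inner = ((0 : Int), k) := by
          simp only [pvDecode]; rw [if_pos h1]
        exact ⟨hd, by simp [hd]⟩)
  congr 1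
  · -- segment 2: bottom row
    refine (pvSeg m (2 * m)
      (fun rc : Int × Int => PySem.List.pyGetD (PySem.List.pyGetD grid rc.1 ([] : List Int)) rc.2 0 == 1)
      (fun k => pvDecode k n m inner)
      (fun k => PySem.List.pyGetD (PySem.List.pyGetD grid (n - 1) ([] : List Int)) (k - m) 0 == 1)
      (fun k => (n - 1, k - m)) ?_).trans ?_
    · intro k h0 h1
      have hd : pvDecode k n m inner = (n - 1, k - m) := by
        simp only [pvDecode]; rw [if_neg (by omega), if_pos (by omega)]
      exact ⟨hd, by simp [hd]⟩
    · have hs := pvShiftFM m (2 * m) m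
        (fun c => PySem.List.pyGetD (PySem.List.pyGetD grid (n - 1) ([] : List Int)) c 0 == 1)
        (fun c => ((n - 1 : Int), c))
      rw [show m - m = (0 : Int) from by ring, show 2 * m - m = m from by ring] at hs
      exact hs
  congr 1
  · -- segment 3: left column, interior rows
    refine (pvSeg (2 * m) (2 * m + inner)
      (fun rc : Int × Int => PySem.List.pyGetD (PySem.List.pyGetD grid rc.1 ([] : List Int)) rc.2 0 == 1)
      (fun k => pvDecode k n m inner)
      (fun k => PySem.List.pyGetD (PySem.List.pyGetD grid (k - (2 * m - 1)) ([] : List Int)) 0 0 == 1)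
      (fun k => (k - (2 * m - 1), (0 : Int))) ?_).trans ?_
    · intro k h0 h1
      have hd : pvDecode k n m inner = (k - (2 * m - 1), (0 : Int)) := by
        simp only [pvDecode]
        rw [if_neg (by omega), if_neg (by omega), if_pos (by omega)]
        rw [show k - 2 * m + 1 = k - (2 * m - 1) from by ring]
      exact ⟨hd, by simp [hd]⟩
    · have hs := pvShiftFM (2 * m) (2 * m + inner) (2 * m - 1)
        (fun r => PySem.List.pyGetD (PySem.List.pyGetD grid r ([] : List Int)) 0 0 == 1)
        (fun r => (r, (0 : Int)))
      rw [show 2 * m - (2 * m - 1) = (1 : Int) from by ring,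
          show 2 * m + inner - (2 * m - 1) = inner + 1 from by ring, hinner,
          pvInnerRange n] at hs
      exact hs
  · -- segment 4: right column, interior rows
    refine (pvSeg (2 * m + inner) (2 * m + 2 * inner)
      (fun rc : Int × Int => PySem.List.pyGetD (PySem.List.pyGetD grid rc.1 ([] : List Int)) rc.2 0 == 1)
      (fun k => pvDecode k n m inner)
      (fun k => PySem.List.pyGetD (PySem.List.pyGetD grid (k - (2 * m + inner - 1)) ([] : List Int)) (m - 1) 0 == 1)
      (fun k => (k - (2 * m + inner - 1), m - 1)) ?_).trans ?_
    · intro k h0 h1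
      have hd : pvDecode k n m inner = (k - (2 * m + inner - 1), m - 1) := by
        simp only [pvDecode]
        rw [if_neg (by omega), if_neg (by omega), if_neg (by omega)]
        rw [show k - 2 * m - inner + 1 = k - (2 * m + inner - 1) from by ring]
      exact ⟨hd, by simp [hd]⟩
    · have hs := pvShiftFM (2 * m + inner) (2 * m + 2 * inner) (2 * m + inner - 1)
        (fun r => PySem.List.pyGetD (PySem.List.pyGetD grid r ([] : List Int)) (m - 1) 0 == 1)
        (fun r => (r, m - 1))
      rw [show 2 * m + inner - (2 * m + inner - 1) = (1 : Int) from by ring,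
          show 2 * m + 2 * inner - (2 * m + inner - 1) = inner + 1 from by ring, hinner,
          pvInnerRange n] at hs
      exact hs

-- the heart of the equivalence: restricting the two side-column scans to the interior rows
-- changes nothing once the list is deduplicated in first-occurrence order, because the four
-- corner cells (when equal to 1) are already contributed by the top/bottom-row scans.
lemma pvBorder_set_eq (m n : Int) (hm : 1 ≤ m) (hn : 1 ≤ n)
    (pt pb pl pr : Int → Bool)
    (hTL : pl 0 = pt 0) (hBL : pl (n - 1) = pb 0)
    (hTR : pr 0 = pt (m - 1)) (hBR : pr (n - 1) = pb (m - 1)) :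
    PySem.Set.ofList
      (((PySem.List.pyRange 0 m 1).filter pt).map (fun c => ((0 : Int), c)) ++
       ((PySem.List.pyRange 0 m 1).filter pb).map (fun c => (n - 1, c)) ++
       ((PySem.List.pyRange 0 n 1).filter pl).map (fun r => (r, (0 : Int))) ++
       ((PySem.List.pyRange 0 n 1).filter pr).map (fun r => (r, m - 1)))
  = PySem.Set.ofList
      (((PySem.List.pyRange 0 m 1).filter pt).map (fun c => ((0 : Int), c)) ++
       ((PySem.List.pyRange 0 m 1).filter pb).map (fun c => (n - 1, c)) ++
       ((PySem.List.pyRange 1 (n - 1) 1).filter pl).map (fun r => (r, (0 : Int))) ++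
       ((PySem.List.pyRange 1 (n - 1) 1).filter pr).map (fun r => (r, m - 1))) := by
  have hc0 : ((List.filter pl [(0 : Int)]).map (fun r => (r, (0 : Int))))
      = (if pl 0 then [((0 : Int), (0 : Int))] else []) := by
    cases h : pl (0 : Int) <;> simp [h]
  have hc1 : ((List.filter pl [n - 1]).map (fun r => (r, (0 : Int))))
      = (if pl (n - 1) then [(n - 1, (0 : Int))] else []) := by
    cases h : pl (n - 1) <;> simp [h]
  have hd0 : ((List.filter pr [(0 : Int)]).map (fun r => (r, m - 1)))
      = (if pr 0 then [((0 : Int), m - 1)] else []) := by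
    cases h : pr (0 : Int) <;> simp [h]
  have hd1 : ((List.filter pr [n - 1]).map (fun r => (r, m - 1)))
      = (if pr (n - 1) then [(n - 1, m - 1)] else []) := by
    cases h : pr (n - 1) <;> simp [h]
  have hTmem : pl 0 = true → ((0 : Int), (0 : Int)) ∈
      (PySem.Set.ofList (((PySem.List.pyRange 0 m 1).filter pt).map (fun c => ((0 : Int), c)))).update
        (((PySem.List.pyRange 0 m 1).filter pb).map (fun c => (n - 1, c))) := by
    intro h
    exact (PySem.Set.mem_update _ _ _).2 (Or.inl ((PySem.Set.mem_ofList _ _).2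
      (pvMem_map_filter_pyRange pt (fun c => ((0 : Int), c)) le_rfl (by omega) (hTL ▸ h))))
  have hTmem' : pr 0 = true → ((0 : Int), m - 1) ∈
      (PySem.Set.ofList (((PySem.List.pyRange 0 m 1).filter pt).map (fun c => ((0 : Int), c)))).update
        (((PySem.List.pyRange 0 m 1).filter pb).map (fun c => (n - 1, c))) := by
    intro h
    exact (PySem.Set.mem_update _ _ _).2 (Or.inl ((PySem.Set.mem_ofList _ _).2
      (pvMem_map_filter_pyRange pt (fun c => ((0 : Int), c)) (by omega) (by omega) (hTR ▸ h))))
  have hBmem : pl (n - 1) = true → (n - 1, (0 : Int)) ∈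
      (PySem.Set.ofList (((PySem.List.pyRange 0 m 1).filter pt).map (fun c => ((0 : Int), c)))).update
        (((PySem.List.pyRange 0 m 1).filter pb).map (fun c => (n - 1, c))) := by
    intro h
    exact (PySem.Set.mem_update _ _ _).2 (Or.inr
      (pvMem_map_filter_pyRange pb (fun c => (n - 1, c)) le_rfl (by omega) (hBL ▸ h)))
  have hBmem' : pr (n - 1) = true → (n - 1, m - 1) ∈
      (PySem.Set.ofList (((PySem.List.pyRange 0 m 1).filter pt).map (fun c => ((0 : Int), c)))).update
        (((PySem.List.pyRange 0 m 1).filter pb).map (fun c => (n - 1, c))) := by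
    intro h
    exact (PySem.Set.mem_update _ _ _).2 (Or.inr
      (pvMem_map_filter_pyRange pb (fun c => (n - 1, c)) (by omega) (by omega) (hBR ▸ h)))
  rcases eq_or_lt_of_le hn with h1 | h2
  · -- n = 1 : the side-column scans see only the two (coinciding) corner rows
    subst h1
    have e0 : PySem.List.pyRange 0 1 1 = [(0 : Int)] := by
      simpa using PySem.List.pyRange_one_singleton 0
    have enil : PySem.List.pyRange 1 (1 - 1) 1 = ([] : List Int) :=
      PySem.List.pyRange_one_eq_nil (by omega)
    rw [e0, enil]
    simp only [List.filter_nil, List.map_nil]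
    rw [hc0, hd0]
    simp only [pvOfList_append, pvUpdate_nil]
    rw [pvUpdate_opt _ _ _ hTmem, pvUpdate_opt _ _ _ hTmem']
  · -- 2 ≤ n : split the row range into first row, interior rows, last row
    have hsplit : PySem.List.pyRange 0 n 1
        = [(0 : Int)] ++ PySem.List.pyRange 1 (n - 1) 1 ++ [n - 1] := by
      rw [PySem.List.pyRange_one_append 0 1 n (by omega) (by omega),
          PySem.List.pyRange_one_append 1 (n - 1) n (by omega) (by omega)]
      have e3 : PySem.List.pyRange 0 1 1 = [(0 : Int)] := by
        simpa using PySem.List.pyRange_one_singleton 0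
      have e4 : PySem.List.pyRange (n - 1) n 1 = [n - 1] := by
        have := PySem.List.pyRange_one_singleton (n - 1)
        rwa [sub_add_cancel] at this
      rw [e3, e4, List.append_assoc]
    rw [hsplit]
    simp only [List.filter_append, List.map_append]
    rw [hc0, hc1, hd0, hd1]
    simp only [pvOfList_append, pvUpdate_append]
    rw [pvUpdate_opt _ _ _ hTmem]
    rw [pvUpdate_opt _ _ _ (fun h => (PySem.Set.mem_update _ _ _).2 (Or.inl (hBmem h)))]
    rw [pvUpdate_opt _ _ _ (fun h => (PySem.Set.mem_update _ _ _).2 (Or.inl (hTmem' h)))]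
    rw [pvUpdate_opt _ _ _ (fun h =>
      (PySem.Set.mem_update _ _ _).2 (Or.inl ((PySem.Set.mem_update _ _ _).2 (Or.inl (hBmem' h)))))]

-- ===== VERDICT =====
theorem find_ones_at_borders_spec : Claim_equal_find_ones_at_borders := by
  intro grid _ hpre
  obtain ⟨hne, hm, _⟩ := hpre
  unfold Spec_find_ones_at_borders find_ones_at_borders
  rw [pvAltChar]
  simp only [PySem.List.foldl_append_if, List.nil_append, List.append_assoc]
  have hg0 : PySem.List.pyGetD grid 0 ([] : List Int) = grid.headI := by
    cases grid with
    | nil => exact absurd rfl hne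
    | cons h t => simp [PySem.List.pyGetD_zero]
  have hm' : (1 : Int) ≤ ((PySem.List.pyGetD grid 0 ([] : List Int)).length : Int) := by
    rw [hg0]; exact_mod_cast hm
  have hn' : (1 : Int) ≤ (grid.length : Int) := by
    exact_mod_cast List.length_pos_of_ne_nil hne
  simpa [List.append_assoc] using
    pvBorder_set_eq ((PySem.List.pyGetD grid 0 ([] : List Int)).length : Int) (grid.length : Int)
      hm' hn'
      (fun c => PySem.List.pyGetD (PySem.List.pyGetD grid 0 ([] : List Int)) c 0 == 1)
      (fun c => PySem.List.pyGetD (PySem.List.pyGetD grid ((grid.length : Int) - 1) ([] : List Int)) c 0 == 1)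
      (fun r => PySem.List.pyGetD (PySem.List.pyGetD grid r ([] : List Int)) 0 0 == 1)
      (fun r => PySem.List.pyGetD (PySem.List.pyGetD grid r ([] : List Int)) ((((PySem.List.pyGetD grid 0 ([] : List Int)).length : Int)) - 1) 0 == 1)
      rfl rfl rfl rfl
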